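-- pv_equiv track=rewrite | github.com/ali-jin/holbertonschool-Markdown2HTML | markdown2html.py | markdown_paragraph_to_html
-- ===== SOURCE A (Python) =====
-- def markdown_paragraph_to_html(lines):
--     markdown_list = ('<h', '<ul>', '<li>', '<ol>', '</ul>', '</ol>')
--     lines_list = []
--     text_list = []
--
--     for line in lines:
--         if not line.lstrip().startswith(markdown_list) and line.strip() != '':
--             text_list.append(line.strip())
--         else:
--             if text_list:
--                 lines_list.append('<p>\n' +
--                                   '\n<br/>\n'.join(text_list) + '\n</p>\n')
--                 text_list = []
--             if line.strip() != '':
--                 lines_list.append(line)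
--     if text_list:
--         lines_list.append('<p>\n' + '\n<br/>\n'.join(text_list) + '\n</p>\n')
--     return lines_list
-- ===== SOURCE B (Python) =====
-- def markdown_paragraph_to_html(lines):
--     markdown_list = ('<h', '<ul>', '<li>', '<ol>', '</ul>', '</ol>')
--
--     def is_text(line):
--         return line.strip() != '' and not line.lstrip().startswith(markdown_list)
--
--     out = []
--     i, n = 0, len(lines)
--     while i < n:
--         if is_text(lines[i]):
--             j = i
--             while j < n and is_text(lines[j]):
--                 j += 1
--             out.append('<p>\n' +
--                        '\n<br/>\n'.join(l.strip() for l in lines[i:j]) +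
--                        '\n</p>\n')
--             i = j
--         else:
--             if lines[i].strip() != '':
--                 out.append(lines[i])
--             i += 1
--     return out
-- ===== Notes on version B (the rewrite author's own statement) =====
-- stated objective: alternative
-- what changed: Replaces A's single-pass accumulator/flush state machine (pending text_list flushed at each non-text line and at the end) with run-based traversal: an index scan that finds each maximal run of consecutive text lines (inner while = span) and emits its paragraph in one step, copying non-empty markdown lines individually.
import Mathlib
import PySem

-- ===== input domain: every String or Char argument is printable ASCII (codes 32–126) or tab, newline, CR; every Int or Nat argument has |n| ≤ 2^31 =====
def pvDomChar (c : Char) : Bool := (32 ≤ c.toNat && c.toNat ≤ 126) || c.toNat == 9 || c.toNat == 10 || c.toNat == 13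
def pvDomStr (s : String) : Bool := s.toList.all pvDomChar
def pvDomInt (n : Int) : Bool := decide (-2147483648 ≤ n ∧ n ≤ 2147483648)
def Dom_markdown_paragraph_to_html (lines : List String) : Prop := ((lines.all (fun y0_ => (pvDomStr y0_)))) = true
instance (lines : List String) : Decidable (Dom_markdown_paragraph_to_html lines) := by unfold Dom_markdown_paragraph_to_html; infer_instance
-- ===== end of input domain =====

-- B replaces A's accumulator/flush state machine with run-based traversal (span over maximal
-- runs of text lines); same cost, alternative decomposition.

-- shared by both ports: the tuple test line.lstrip().startswith(('<h','<ul>','<li>','<ol>','</ul>','</ol>'))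
def pvStartsMd (line : String) : Bool :=
  let l := PySem.Str.lstrip line
  PySem.Str.startswith l "<h" || PySem.Str.startswith l "<ul>" || PySem.Str.startswith l "<li>" ||
  PySem.Str.startswith l "<ol>" || PySem.Str.startswith l "</ul>" || PySem.Str.startswith l "</ol>"

-- shared paragraph builder: '<p>\n' + '\n<br/>\n'.join(ts) + '\n</p>\n'
def pvPara (ts : List String) : String :=
  "<p>\n" ++ PySem.Str.join "\n<br/>\n" ts ++ "\n</p>\n"

-- ===== PORT A =====
-- loop body of A: state = (lines_list, text_list)
def mdA_step (st : List String × List String) (line : String) : List String × List String :=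
  if !pvStartsMd line && PySem.Str.strip line ≠ "" then
    (st.1, st.2 ++ [PySem.Str.strip line])
  else
    let out1 := if st.2 ≠ [] then st.1 ++ [pvPara st.2] else st.1
    let out2 := if PySem.Str.strip line ≠ "" then out1 ++ [line] else out1
    (out2, [])

def markdown_paragraph_to_html (lines : List String) : List String :=
  let st := lines.foldl mdA_step ([], [])
  if st.2 ≠ [] then st.1 ++ [pvPara st.2] else st.1

-- ===== PORT B =====
def pvIsText (line : String) : Bool :=
  PySem.Str.strip line ≠ "" && !pvStartsMd line

-- B's outer while over the index; the inner while collecting a maximal run of text lines is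
-- the span (takeWhile/dropWhile) at the head of the remaining list.
def mdB_go : List String → List String
  | [] => []
  | l :: ls =>
    if pvIsText l then
      pvPara ((l :: ls.takeWhile pvIsText).map PySem.Str.strip) :: mdB_go (ls.dropWhile pvIsText)
    else if PySem.Str.strip l ≠ "" then
      l :: mdB_go ls
    else
      mdB_go ls
  termination_by ls => ls.length
  decreasing_by
  · simpa [Nat.lt_succ_iff] using List.length_dropWhile_le pvIsText ls
  · simp
  · simp

def markdown_paragraph_to_html_alt (lines : List String) : List String := mdB_go lines

-- ===== PRECONDITION & SPEC =====
def Spec_markdown_paragraph_to_html (lines : List String) (out : List String) : Prop := out = markdown_paragraph_to_html_alt lines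
instance (lines : List String) (out : List String) : Decidable (Spec_markdown_paragraph_to_html lines out) := by unfold Spec_markdown_paragraph_to_html; infer_instance

-- ===== CLAIM (what is proved, stated in full; the proofs are below) =====
def Claim_equal_markdown_paragraph_to_html : Prop := ∀ (lines : List String), Dom_markdown_paragraph_to_html lines → Spec_markdown_paragraph_to_html lines (markdown_paragraph_to_html lines)

-- ===== LEMMAS AND PROOFS =====

-- A's loop with pending text acc, written as a recursion (proof device)
def mdAux (acc : List String) : List String → List String
  | [] => if acc ≠ [] then [pvPara acc] else []
  | l :: ls =>
    if !pvStartsMd l && PySem.Str.strip l ≠ "" then mdAux (acc ++ [PySem.Str.strip l]) ls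
    else (if acc ≠ [] then [pvPara acc] else []) ++ (if PySem.Str.strip l ≠ "" then [l] else []) ++ mdAux [] ls

lemma foldl_eq_mdAux (ls : List String) : ∀ (out acc : List String),
    (let st := ls.foldl mdA_step (out, acc);
     if st.2 ≠ [] then st.1 ++ [pvPara st.2] else st.1) = out ++ mdAux acc ls := by
  induction ls with
  | nil =>
    intro out acc
    simp only [List.foldl_nil, mdAux]
    split <;> simp
  | cons l ls ih =>
    intro out acc
    simp only [List.foldl_cons]
    by_cases h : (!pvStartsMd l && PySem.Str.strip l ≠ "") = true
    · have hstep : mdA_step (out, acc) l = (out, acc ++ [PySem.Str.strip l]) := by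
        unfold mdA_step; rw [if_pos h]
      rw [hstep, ih out (acc ++ [PySem.Str.strip l]), mdAux, if_pos h]
    · have hstep : mdA_step (out, acc) l =
          ((if acc ≠ [] then out ++ [pvPara acc] else out) ++
            (if PySem.Str.strip l ≠ "" then [l] else []), []) := by
        unfold mdA_step; rw [if_neg h]
        by_cases ha : acc = [] <;> by_cases hs : PySem.Str.strip l = "" <;> simp [ha, hs]
      rw [hstep, ih, mdAux, if_neg h]
      by_cases ha : acc = [] <;> by_cases hs : PySem.Str.strip l = "" <;>
        simp [ha, hs, List.append_assoc]

lemma isText_eq (l : String) : pvIsText l = (!pvStartsMd l && PySem.Str.strip l ≠ "") := by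
  simp [pvIsText, Bool.and_comm]

lemma mdAux_pending (ls : List String) : ∀ (acc : List String), acc ≠ [] →
    mdAux acc ls = pvPara (acc ++ (ls.takeWhile pvIsText).map PySem.Str.strip)
                   :: mdAux [] (ls.dropWhile pvIsText) := by
  induction ls with
  | nil => intro acc h; simp [mdAux, h]
  | cons l ls ih =>
    intro acc h
    by_cases ht : pvIsText l = true
    · have hA : (!pvStartsMd l && PySem.Str.strip l ≠ "") = true := by rw [← isText_eq]; exact ht
      rw [mdAux, if_pos hA, ih (acc ++ [PySem.Str.strip l]) (by simp),
        List.takeWhile_cons_of_pos ht, List.dropWhile_cons_of_pos ht]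
      simp [List.append_assoc]
    · have hA : ¬ ((!pvStartsMd l && PySem.Str.strip l ≠ "") = true) := by rw [← isText_eq]; simpa using ht
      rw [mdAux, if_neg hA, if_pos h,
        List.takeWhile_cons_of_neg (by simpa using ht), List.dropWhile_cons_of_neg (by simpa using ht)]
      have h2 : mdAux [] (l :: ls) = (if PySem.Str.strip l ≠ "" then [l] else []) ++ mdAux [] ls := by
        rw [mdAux, if_neg hA]; simp
      rw [h2]; simp

lemma mdAux_nil_eq_go (ls : List String) : mdAux [] ls = mdB_go ls := by
  induction ls using mdB_go.induct with
  | case1 => simp [mdAux, mdB_go]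
  | case2 l ls ht ih =>
    have hA : (!pvStartsMd l && PySem.Str.strip l ≠ "") = true := by rw [← isText_eq]; exact ht
    rw [mdAux, if_pos hA]
    simp only [List.nil_append]
    rw [mdAux_pending ls [PySem.Str.strip l] (by simp), ih, mdB_go, if_pos ht]
    simp
  | case3 l ls ht hs ih =>
    have hA : ¬ ((!pvStartsMd l && PySem.Str.strip l ≠ "") = true) := by rw [← isText_eq]; simpa using ht
    rw [mdAux, if_neg hA, mdB_go, if_neg ht, if_pos hs, ih]
    simp [hs]
  | case4 l ls ht hs ih =>
    have hA : ¬ ((!pvStartsMd l && PySem.Str.strip l ≠ "") = true) := by rw [← isText_eq]; simpa using ht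
    rw [mdAux, if_neg hA, mdB_go, if_neg ht, if_neg hs, ih]
    simp [hs]

-- ===== VERDICT (by name: the statement is the Claim_ definition above) =====
theorem markdown_paragraph_to_html_spec : Claim_equal_markdown_paragraph_to_html := by
  intro lines _
  show markdown_paragraph_to_html lines = markdown_paragraph_to_html_alt lines
  unfold markdown_paragraph_to_html markdown_paragraph_to_html_alt
  rw [foldl_eq_mdAux lines [] [], mdAux_nil_eq_go]
  simp
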